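-- pv_equiv track=rewrite | github.com/GanizaniSitara/open-moniker-client | moniker_client/adapters/oracle.py | _inject_flashback
-- ===== SOURCE A (Python) =====
-- def _inject_flashback(query: str, as_of: str) -> str:
--     """Inject Oracle Flashback AS OF clause."""
--     # Find the FROM clause and inject AS OF after table name
--     # This is a simplified approach - a full SQL parser would be better
--     query_upper = query.upper()
--
--     # Handle different timestamp formats
--     if as_of.isdigit():
--         # SCN (System Change Number)
--         flashback_clause = f" AS OF SCN {as_of}"
--     else:
--         # Timestamp - try to parse and format
--         flashback_clause = f" AS OF TIMESTAMP TO_TIMESTAMP('{as_of}', 'YYYY-MM-DD HH24:MI:SS')"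
--
--     # Find FROM clause position
--     from_pos = query_upper.find(" FROM ")
--     if from_pos == -1:
--         return query
--
--     # Find end of table name (next keyword or end)
--     end_markers = [" WHERE ", " GROUP ", " ORDER ", " HAVING ", " UNION ", ";"]
--     end_pos = len(query)
--
--     for marker in end_markers:
--         pos = query_upper.find(marker, from_pos + 6)
--         if pos != -1 and pos < end_pos:
--             end_pos = pos
--
--     # Insert flashback clause after table name
--     return query[:end_pos] + flashback_clause + query[end_pos:]
-- ===== SOURCE B (Python) =====
-- def _inject_flashback(query: str, as_of: str) -> str:
--     """Inject Oracle Flashback AS OF clause."""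
--     query_upper = query.upper()
--
--     if as_of.isdigit():
--         flashback_clause = f" AS OF SCN {as_of}"
--     else:
--         flashback_clause = f" AS OF TIMESTAMP TO_TIMESTAMP('{as_of}', 'YYYY-MM-DD HH24:MI:SS')"
--
--     from_pos = query_upper.find(" FROM ")
--     if from_pos == -1:
--         return query
--
--     # Single left-to-right scan: stop at the first position where any end
--     # marker starts (instead of six full finds and a running minimum).
--     markers = (" WHERE ", " GROUP ", " ORDER ", " HAVING ", " UNION ", ";")
--     i = from_pos + 6
--     while i < len(query) and not any(query_upper.startswith(m, i) for m in markers):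
--         i += 1
--
--     return query[:i] + flashback_clause + query[i:]
-- ===== Notes on version B (the rewrite author's own statement) =====
-- stated objective: alternative
-- what changed: A runs six separate str.find passes over the query and keeps a running minimum to locate the end of the table name; B makes one left-to-right scan from the FROM clause and stops at the first position where any end marker starts.
import Mathlib
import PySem

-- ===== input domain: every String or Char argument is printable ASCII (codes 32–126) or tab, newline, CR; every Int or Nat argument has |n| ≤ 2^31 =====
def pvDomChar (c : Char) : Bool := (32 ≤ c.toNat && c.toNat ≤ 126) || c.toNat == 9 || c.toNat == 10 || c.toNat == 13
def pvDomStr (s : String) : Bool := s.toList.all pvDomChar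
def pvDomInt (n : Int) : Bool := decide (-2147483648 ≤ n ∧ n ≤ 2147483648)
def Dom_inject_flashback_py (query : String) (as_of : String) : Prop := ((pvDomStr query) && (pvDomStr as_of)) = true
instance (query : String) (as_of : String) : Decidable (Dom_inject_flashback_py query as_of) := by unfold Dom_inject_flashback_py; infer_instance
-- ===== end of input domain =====

-- B replaces A's six full `find` passes plus a running minimum by one left-to-right scan
-- that stops at the first position where any end marker starts (objective: alternative single-pass scan).

-- the end-marker list both Pythons spell out literally
def injMarkers : List (List Char) :=
  [" WHERE ".toList, " GROUP ".toList, " ORDER ".toList, " HAVING ".toList, " UNION ".toList, ";".toList]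

-- ===== PORT A =====
def inject_flashback_py (query : String) (as_of : String) : String :=
  let cs := query.toList
  let query_upper := PySem.Chars.upper cs
  let flashback_clause : List Char :=
    if PySem.Chars.strIsdigit as_of.toList then
      " AS OF SCN ".toList ++ as_of.toList
    else
      " AS OF TIMESTAMP TO_TIMESTAMP('".toList ++ as_of.toList ++ "', 'YYYY-MM-DD HH24:MI:SS')".toList
  let from_pos := PySem.Chars.find query_upper " FROM ".toList
  if from_pos = -1 then query
  else
    let end_pos := injMarkers.foldl (fun e m =>
      let pos := PySem.Chars.findFrom query_upper m (from_pos + 6)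
      if pos ≠ -1 ∧ pos < e then pos else e) ((cs.length : Int))
    String.ofList (PySem.List.slice cs none (some end_pos) ++ flashback_clause ++
               PySem.List.slice cs (some end_pos) none)

-- ===== PORT B =====
-- B's while loop: advance i until i = len(query) or some marker starts at i.
-- Python's query_upper.startswith(m, i) for 0 ≤ i is exactly `startswith (drop i qu) m`.
def injScanB (qu : List Char) (n : Nat) (i : Nat) : Nat :=
  if h : i < n ∧ ¬ (injMarkers.any (fun m => PySem.Chars.startswith (qu.drop i) m) = true) then
    injScanB qu n (i + 1)
  else i
termination_by n - i
decreasing_by omega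

def inject_flashback_py_alt (query : String) (as_of : String) : String :=
  let cs := query.toList
  let query_upper := PySem.Chars.upper cs
  let flashback_clause : List Char :=
    if PySem.Chars.strIsdigit as_of.toList then
      " AS OF SCN ".toList ++ as_of.toList
    else
      " AS OF TIMESTAMP TO_TIMESTAMP('".toList ++ as_of.toList ++ "', 'YYYY-MM-DD HH24:MI:SS')".toList
  let from_pos := PySem.Chars.find query_upper " FROM ".toList
  if from_pos = -1 then query
  else
    let i := injScanB query_upper cs.length (from_pos.toNat + 6)
    String.ofList (cs.take i ++ flashback_clause ++ cs.drop i)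

-- ===== PRECONDITION & SPEC =====
def Spec_inject_flashback_py (query : String) (as_of : String) (out : String) : Prop := out = inject_flashback_py_alt query as_of
instance (query : String) (as_of : String) (out : String) : Decidable (Spec_inject_flashback_py query as_of out) := by unfold Spec_inject_flashback_py; infer_instance

-- ===== CLAIM (what is proved, stated in full; the proofs are below) =====
def Claim_equal_inject_flashback_py : Prop := ∀ (query : String) (as_of : String), Dom_inject_flashback_py query as_of → Spec_inject_flashback_py query as_of (inject_flashback_py query as_of)

-- ===== LEMMAS AND PROOFS =====

-- "some end marker starts at position i of qu"
def injPAt (qu : List Char) (i : Nat) : Bool :=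
  injMarkers.any (fun m => PySem.Chars.startswith (qu.drop i) m)

-- r is the first position ≥ k (if any, else the length) where some marker starts
def injGood (qu : List Char) (k r : Nat) : Prop :=
  k ≤ r ∧ r ≤ qu.length ∧ (∀ i, k ≤ i → i < r → injPAt qu i = false) ∧
    (r = qu.length ∨ injPAt qu r = true)

-- A's fold body, named so the fold lemmas can be stated about it
def injStep (qu : List Char) (s : Int) (e : Int) (m : List Char) : Int :=
  let pos := PySem.Chars.findFrom qu m s
  if pos ≠ -1 ∧ pos < e then pos else e

lemma injGood_unique (qu : List Char) (k r₁ r₂ : Nat)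
    (h₁ : injGood qu k r₁) (h₂ : injGood qu k r₂) : r₁ = r₂ := by
  obtain ⟨hk₁, hl₁, hlo₁, hup₁⟩ := h₁
  obtain ⟨hk₂, hl₂, hlo₂, hup₂⟩ := h₂
  by_contra hne
  rcases Nat.lt_or_ge r₁ r₂ with h | h
  · have hf := hlo₂ r₁ hk₁ h
    rcases hup₁ with he | ht
    · omega
    · rw [ht] at hf; cases hf
  · have hlt : r₂ < r₁ := by omega
    have hf := hlo₁ r₂ hk₂ hlt
    rcases hup₂ with he | ht
    · omega
    · rw [ht] at hf; cases hf

lemma injScanB_good (qu : List Char) (n : Nat) (hn : n = qu.length) :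
    ∀ d k, n - k = d → k ≤ n → injGood qu k (injScanB qu n k) := by
  intro d
  induction d with
  | zero =>
    intro k hd hk
    rw [injScanB, dif_neg (by omega)]
    exact ⟨le_refl _, by omega, fun i h1 h2 => by omega, Or.inl (by omega)⟩
  | succ d ih =>
    intro k hd hk
    rw [injScanB]
    split
    · rename_i h
      obtain ⟨hk', hl', hlo', hup'⟩ := ih (k + 1) (by omega) (by omega)
      refine ⟨by omega, hl', ?_, hup'⟩
      intro i h1 h2
      rcases Nat.eq_or_lt_of_le h1 with he | hlt
      · subst he
        simpa [injPAt] using h.2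
      · exact hlo' i hlt h2
    · rename_i h
      push Not at h
      refine ⟨le_refl _, by omega, fun i h1 h2 => by omega, ?_⟩
      by_cases hkn : k = n
      · exact Or.inl (by omega)
      · exact Or.inr (by simpa [injPAt] using h (by omega))

-- a marker that is a prefix of drop i is an infix of drop k for k ≤ i
lemma prefix_drop_infix {m L : List Char} {k i : Nat} (hk : k ≤ i)
    (h : m <+: L.drop i) : m <:+: L.drop k := by
  have : L.drop i = (L.drop k).drop (i - k) := by
    rw [List.drop_drop]; congr 1; omega
  rw [this] at h
  exact h.isInfix.trans ((L.drop k).drop_suffix (i - k)).isInfix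

-- generic shape of A's running-minimum fold
lemma injStep_eq (qu : List Char) (s e : Int) (m : List Char) :
    injStep qu s e m = if PySem.Chars.findFrom qu m s ≠ -1 ∧ PySem.Chars.findFrom qu m s < e
      then PySem.Chars.findFrom qu m s else e := rfl

lemma injFold_min (qu : List Char) (s : Int) (M : List (List Char)) :
    ∀ e : Int,
      M.foldl (injStep qu s) e ≤ e ∧
      (M.foldl (injStep qu s) e = e ∨
        ∃ m ∈ M, M.foldl (injStep qu s) e = PySem.Chars.findFrom qu m s ∧
          PySem.Chars.findFrom qu m s ≠ -1) ∧
      (∀ m ∈ M, PySem.Chars.findFrom qu m s ≠ -1 →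
        M.foldl (injStep qu s) e ≤ PySem.Chars.findFrom qu m s) := by
  induction M with
  | nil => intro e; exact ⟨le_refl _, Or.inl rfl, fun m hm => absurd hm List.not_mem_nil⟩
  | cons m M ih =>
    intro e
    simp only [List.foldl_cons]
    rw [injStep_eq]
    split
    · rename_i hc
      obtain ⟨ihle, ihor, ihmin⟩ := ih (PySem.Chars.findFrom qu m s)
      refine ⟨by omega, ?_, ?_⟩
      · rcases ihor with heq | ⟨m', hm', heq, hne⟩
        · exact Or.inr ⟨m, List.mem_cons_self, heq, hc.1⟩
        · exact Or.inr ⟨m', List.mem_cons_of_mem _ hm', heq, hne⟩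
      · intro m' hm' hne
        rcases List.mem_cons.mp hm' with he₂ | hm₂
        · subst he₂; omega
        · exact ihmin m' hm₂ hne
    · rename_i hc
      obtain ⟨ihle, ihor, ihmin⟩ := ih e
      refine ⟨ihle, ?_, ?_⟩
      · rcases ihor with heq | ⟨m', hm', heq, hne⟩
        · exact Or.inl heq
        · exact Or.inr ⟨m', List.mem_cons_of_mem _ hm', heq, hne⟩
      · intro m' hm' hne
        rcases List.mem_cons.mp hm' with he₂ | hm₂
        · subst he₂
          have : e ≤ PySem.Chars.findFrom qu m' s := by
            by_contra hlt; exact hc ⟨hne, by omega⟩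
          omega
        · exact ihmin m' hm₂ hne

lemma injFold_good (qu : List Char) (k : Nat) (hk : k ≤ qu.length) :
    ∃ r : Nat, injMarkers.foldl (injStep qu (k : Int)) ((qu.length : Int)) = (r : Int) ∧
      injGood qu k r := by
  obtain ⟨hle, hor, hmin⟩ := injFold_min qu (k : Int) injMarkers ((qu.length : Int))
  set R := injMarkers.foldl (injStep qu (k : Int)) ((qu.length : Int)) with hR
  have hnonneg : 0 ≤ R ∧ (k : Int) ≤ R := by
    rcases hor with heq | ⟨m, hm, heq, hne⟩
    · constructor <;> omega
    · have := (PySem.Chars.findFrom_natCast_spec qu m k hk hne).1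
      constructor <;> omega
  refine ⟨R.toNat, by omega, by omega, by omega, ?_, ?_⟩
  · -- minimality: below R no marker starts
    intro i h1 h2
    rw [injPAt, List.any_eq_false]
    intro m hm hsw
    have hpre := (PySem.Chars.startswith_iff _ _).mp hsw
    by_cases hne : PySem.Chars.findFrom qu m (k : Int) = -1
    · rw [PySem.Chars.findFrom_natCast_eq_neg_one_iff qu m k hk] at hne
      exact hne (prefix_drop_infix h1 hpre)
    · obtain ⟨hkle, _, hmin'⟩ := PySem.Chars.findFrom_natCast_spec qu m k hk hne
      have hR' := hmin m hm hne
      exact hmin' i h1 (by omega) hpre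
  · -- R is either the length or a position where a marker starts
    rcases hor with heq | ⟨m, hm, heq, hne⟩
    · exact Or.inl (by omega)
    · obtain ⟨_, hpre, _⟩ := PySem.Chars.findFrom_natCast_spec qu m k hk hne
      rw [← heq] at hpre
      refine Or.inr ?_
      rw [injPAt, List.any_eq_true]
      exact ⟨m, hm, (PySem.Chars.startswith_iff _ _).mpr hpre⟩

lemma length_upper (cs : List Char) : (PySem.Chars.upper cs).length = cs.length := by
  simp [PySem.Chars.upper]

-- ===== VERDICT (by name: the statement is the Claim_ definition above) =====
theorem inject_flashback_py_spec : Claim_equal_inject_flashback_py := by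
  intro query as_of _
  unfold Spec_inject_flashback_py
  simp only [inject_flashback_py, inject_flashback_py_alt]
  by_cases h : PySem.Chars.find (PySem.Chars.upper query.toList) " FROM ".toList = -1
  · rw [if_pos h, if_pos h]
  · rw [if_neg h, if_neg h]
    set cs := query.toList with hcs
    set qu := PySem.Chars.upper cs with hqu
    set fp := PySem.Chars.find qu " FROM ".toList with hfp
    have hff : PySem.Chars.findFrom qu " FROM ".toList ((0 : Nat) : Int) ≠ -1 := by
      rw [Nat.cast_zero, PySem.Chars.findFrom_zero, ← hfp]; exact h
    obtain ⟨hge, hpre, _⟩ :=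
      PySem.Chars.findFrom_natCast_spec qu " FROM ".toList 0 (by omega) hff
    rw [Nat.cast_zero, PySem.Chars.findFrom_zero, ← hfp] at hge hpre
    have hlen6 : fp.toNat + 6 ≤ qu.length := by
      have hl := hpre.length_le
      simp [List.length_drop] at hl
      omega
    have hlen : qu.length = cs.length := length_upper cs
    have hcast : fp + 6 = ((fp.toNat + 6 : Nat) : Int) := by omega
    rw [hcast]
    have hstep : (fun (e : Int) (m : List Char) =>
        let pos := PySem.Chars.findFrom qu m ((fp.toNat + 6 : Nat) : Int)
        if pos ≠ -1 ∧ pos < e then pos else e) = injStep qu ((fp.toNat + 6 : Nat) : Int) := rfl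
    rw [hstep]
    obtain ⟨r, hfold, hgoodA⟩ := injFold_good qu (fp.toNat + 6) hlen6
    rw [hlen] at hfold
    rw [hfold]
    have hgoodB := injScanB_good qu cs.length (by omega)
      (cs.length - (fp.toNat + 6)) (fp.toNat + 6) rfl (by omega)
    rw [injGood_unique qu (fp.toNat + 6) _ r hgoodB hgoodA]
    rw [PySem.List.slice_to cs (by omega), PySem.List.slice_from cs (by omega)]
    simp
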